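-- pv_equiv track=rewrite | github.com/logflux/logflux | src/logflux/molfi.py | gen_pc_pairs
-- ===== SOURCE A (Python) =====
-- def gen_pc_pairs(tpls):
--     #generate parent-child pare
--     pairs = []
--
--     if len(tpls) <= 1:
--         return pairs
--
--     for i, ptpl in enumerate(tpls):
--         for j, ctpl in enumerate(tpls):
--             if i==j:
--                 continue
--             elif len(ptpl)!=len(ctpl):
--                 continue
--             else:
--                 is_pc = True
--                 for pword, cword in zip(ptpl, ctpl):
--                     if pword != cword and pword != None:
--                         is_pc = False
--                         break
--                 if is_pc:
--                     pairs.append((ptpl, ctpl))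
--
--     return pairs
-- ===== SOURCE B (Python) =====
-- def gen_pc_pairs(tpls):
--     # bucket templates by length once, then match each parent only against its same-length bucket
--     pairs = []
--
--     if len(tpls) <= 1:
--         return pairs
--
--     buckets = {}
--     for i, t in enumerate(tpls):
--         buckets.setdefault(len(t), []).append((i, t))
--
--     for i, ptpl in enumerate(tpls):
--         for j, ctpl in buckets[len(ptpl)]:
--             if j == i:
--                 continue
--             if all(pword == cword or pword is None for pword, cword in zip(ptpl, ctpl)):
--                 pairs.append((ptpl, ctpl))
--
--     return pairs
-- ===== Notes on version B (the rewrite author's own statement) =====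
-- stated objective: alternative
-- what changed: Replaces A's all-pairs double scan with a dict bucketing templates by length once, so each parent is matched only against its same-length bucket (indices stored to keep the i==j skip and ordering); same worst-case cost when all lengths coincide.
import Mathlib
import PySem

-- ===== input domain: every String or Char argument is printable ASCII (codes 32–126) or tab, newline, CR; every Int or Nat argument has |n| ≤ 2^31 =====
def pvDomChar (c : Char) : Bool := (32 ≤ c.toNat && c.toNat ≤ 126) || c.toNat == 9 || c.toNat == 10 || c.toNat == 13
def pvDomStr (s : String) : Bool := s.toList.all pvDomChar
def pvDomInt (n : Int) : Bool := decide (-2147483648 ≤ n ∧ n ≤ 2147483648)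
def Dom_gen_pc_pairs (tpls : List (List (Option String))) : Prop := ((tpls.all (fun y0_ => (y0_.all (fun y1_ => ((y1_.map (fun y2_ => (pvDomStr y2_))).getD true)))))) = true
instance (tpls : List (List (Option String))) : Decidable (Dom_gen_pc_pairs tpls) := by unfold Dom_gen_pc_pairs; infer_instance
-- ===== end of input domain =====

-- B replaces A's all-pairs scan by a one-pass length-keyed bucket index (same output, different traversal).

-- ===== PORT A =====
-- A's inner `for pword, cword in zip(ptpl, ctpl)` loop with its break, as structural recursion
def pvIsPC : List (Option String × Option String) → Bool
  | [] => true
  | (p, c) :: rest => if p ≠ c ∧ p ≠ none then false else pvIsPC rest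

def gen_pc_pairs (tpls : List (List (Option String))) : List (List (Option String) × List (Option String)) :=
  if tpls.length ≤ 1 then []
  else
    (PySem.List.enumerate tpls).foldl (fun pairs pe =>
      (PySem.List.enumerate tpls).foldl (fun pairs ce =>
        if pe.1 = ce.1 then pairs
        else if pe.2.length ≠ ce.2.length then pairs
        else if pvIsPC (pe.2.zip ce.2) then pairs ++ [(pe.2, ce.2)] else pairs) pairs) []

-- ===== PORT B =====
-- `buckets.setdefault(len(t), []).append((i, t))`: d[len t] = d.get(len t, []) + [(i, t)]
def pvBucketStep (d : PySem.Dict Nat (List (Int × List (Option String)))) (e : Int × List (Option String)) : PySem.Dict Nat (List (Int × List (Option String))) :=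
  d.modify e.2.length [] (· ++ [e])

def gen_pc_pairs_alt (tpls : List (List (Option String))) : List (List (Option String) × List (Option String)) :=
  if tpls.length ≤ 1 then []
  else
    let buckets := (PySem.List.enumerate tpls).foldl pvBucketStep PySem.Dict.empty
    (PySem.List.enumerate tpls).foldl (fun pairs pe =>
      (buckets.getD pe.2.length []).foldl (fun pairs ce =>
        if ce.1 = pe.1 then pairs
        else if (pe.2.zip ce.2).all (fun pc => decide (pc.1 = pc.2 ∨ pc.1 = none)) then pairs ++ [(pe.2, ce.2)] else pairs) pairs) []

-- ===== PRECONDITION & SPEC =====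
def Spec_gen_pc_pairs (tpls : List (List (Option String))) (out : List (List (Option String) × List (Option String))) : Prop := out = gen_pc_pairs_alt tpls
instance (tpls : List (List (Option String))) (out : List (List (Option String) × List (Option String))) : Decidable (Spec_gen_pc_pairs tpls out) := by unfold Spec_gen_pc_pairs; infer_instance

-- ===== CLAIM (what is proved, stated in full; the proofs are below) =====
def Claim_equal_gen_pc_pairs : Prop := ∀ (tpls : List (List (Option String))), Dom_gen_pc_pairs tpls → Spec_gen_pc_pairs tpls (gen_pc_pairs tpls)

-- ===== LEMMAS AND PROOFS =====

-- A's break-loop computes the same Bool as B's `all`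
theorem pvIsPC_eq_all (l : List (Option String × Option String)) :
    pvIsPC l = l.all (fun pc => decide (pc.1 = pc.2 ∨ pc.1 = none)) := by
  induction l with
  | nil => rfl
  | cons x rest ih =>
    obtain ⟨p, c⟩ := x
    simp only [pvIsPC, List.all_cons, ih]
    by_cases h1 : p = c <;> by_cases h2 : p = none <;> simp [h1, h2]

-- the bucket built by B's loop at key L is exactly the length-L sublist (with indices) in order
theorem pvBuckets_getD (l : List (Int × List (Option String))) (d : PySem.Dict Nat (List (Int × List (Option String)))) (L : Nat) :
    (l.foldl pvBucketStep d).getD L [] = d.getD L [] ++ l.filter (fun e => decide (e.2.length = L)) := by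
  induction l generalizing d with
  | nil => simp
  | cons e rest ih =>
    simp only [List.foldl_cons, ih, pvBucketStep, List.filter_cons]
    rw [PySem.Dict.getD_modify]
    by_cases h : e.2.length = L
    · simp [h]
    · simp [h, Ne.symm h]

theorem gen_pc_pairs_spec : Claim_equal_gen_pc_pairs := by
  intro tpls _
  unfold Spec_gen_pc_pairs gen_pc_pairs gen_pc_pairs_alt
  by_cases h : tpls.length ≤ 1
  · simp [h]
  · simp only [h, if_false]
    congr 1
    funext pairs pe
    rw [pvBuckets_getD, PySem.Dict.getD_empty, List.nil_append, List.foldl_filter]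
    congr 1
    funext acc ce
    rw [pvIsPC_eq_all]
    by_cases hl : ce.2.length = pe.2.length
    · by_cases hij : pe.1 = ce.1
      · simp [hl, hij]
      · simp [hl, hij, Ne.symm hij]
    · have hne : pe.2.length ≠ ce.2.length := fun hx => hl hx.symm
      simp [hl, hne]
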